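-- pv_equiv track=rewrite | github.com/lukexyz/cartographer | community/dire_straits/precalculate_route_info.py | get_route_grid
-- ===== SOURCE A (Python) =====
-- from math import dist, ceil, floor
--
-- dimension = 8
--
-- scale = 11
--
-- offset = int( (100 - (dimension*scale))/2 + ceil(scale/2) )
--
-- def chessboard_dist(a, b):
--     return max(abs(a[0]-b[0]), abs(a[1]-b[1]))
--
-- def get_route_grid(route):
--
--     compact_grid = 0
--
--     for x in range(dimension):
--         for y in range(dimension):
--             position = ( offset + scale * x, offset + scale * y )
--
--             for position2 in route:
--                 if chessboard_dist(position, position2) <= 4: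
--                     compact_grid |= 1<<(dimension*x+y)
--                     break
--
--     return compact_grid
-- ===== SOURCE B (Python) =====
-- # B: one pass over the route; each point is mapped by floor-division straight to
-- # the unique grid cell it can be within Chebyshev distance 4 of (cell spacing 11 > 2*4).
-- def get_route_grid(route):
--     g = 0
--     for p in route:
--         tx = p[0] - 8
--         ty = p[1] - 8
--         x = tx // 11
--         y = ty // 11
--         if 0 <= x < 8 and 0 <= y < 8 and tx - 11 * x <= 8 and ty - 11 * y <= 8:
--             g |= 1 << (8 * x + y)
--     return g
-- ===== Notes on version B (the rewrite author's own statement) =====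
-- stated objective: faster
-- what changed: B drops A's scan of all 64 grid cells (each probing the route until a close point) and instead makes one pass over the route, floor-dividing each point's coordinates to the unique grid cell it can be within Chebyshev distance 4 of (cell spacing 11 > 2*4), or-ing that cell's bit in.
import Mathlib
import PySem

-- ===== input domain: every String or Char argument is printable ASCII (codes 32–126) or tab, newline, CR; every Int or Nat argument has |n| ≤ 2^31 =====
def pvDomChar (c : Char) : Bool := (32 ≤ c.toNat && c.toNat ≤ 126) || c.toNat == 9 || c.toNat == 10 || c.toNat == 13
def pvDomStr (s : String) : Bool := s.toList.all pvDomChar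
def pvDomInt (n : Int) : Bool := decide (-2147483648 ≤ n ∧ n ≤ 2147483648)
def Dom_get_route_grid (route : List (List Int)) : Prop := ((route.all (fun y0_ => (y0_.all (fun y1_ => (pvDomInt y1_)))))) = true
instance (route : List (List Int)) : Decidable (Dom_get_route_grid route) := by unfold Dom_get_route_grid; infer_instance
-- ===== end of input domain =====

-- B replaces A's scan of all 64 grid cells (each scanning the route) by one pass over the
-- route, mapping each point by floor division to the unique grid cell it can be within
-- Chebyshev distance 4 of (cell spacing 11 > 2*4); same return value on Pre_.

-- ===== PORT A =====
def pvDimension : Int := 8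
def pvScale : Int := 11
-- offset = int((100 - dimension*scale)/2 + ceil(scale/2)) = int(6.0 + 6); the float
-- arithmetic on these small constants is exact, so the module constant is the literal 12.
def pvOffset : Int := 12

def chessboard_dist (a : Int × Int) (b : List Int) : Int :=
  max |a.1 - PySem.List.pyGetD b 0 0| |a.2 - PySem.List.pyGetD b 1 0|

-- the inner 'for position2 in route: if …: compact_grid |= bit; break' loop
def pvLoopRoute (pos : Int × Int) (route : List (List Int)) (cg bit : Int) : Int :=
  match route with
  | [] => cg
  | p :: r => if chessboard_dist pos p ≤ 4 then PySem.Int.bor cg bit else pvLoopRoute pos r cg bit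

def get_route_grid (route : List (List Int)) : Int :=
  (PySem.List.pyRange 0 pvDimension 1).foldl (fun cg x =>
    (PySem.List.pyRange 0 pvDimension 1).foldl (fun cg y =>
      pvLoopRoute (pvOffset + pvScale * x, pvOffset + pvScale * y) route cg
        ((1 : Int) <<< (pvDimension * x + y).toNat)) cg) 0
        -- shift amount 'dimension*x + y' is in [0,63] for x,y in range(8), so .toNat is exact

-- ===== PORT B =====
def get_route_grid_alt (route : List (List Int)) : Int :=
  route.foldl (fun g p =>
    let tx := PySem.List.pyGetD p 0 0 - 8
    let ty := PySem.List.pyGetD p 1 0 - 8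
    let x := PySem.Int.floordiv tx 11
    let y := PySem.Int.floordiv ty 11
    if 0 ≤ x ∧ x < 8 ∧ 0 ≤ y ∧ y < 8 ∧ tx - 11 * x ≤ 8 ∧ ty - 11 * y ≤ 8
    then PySem.Int.bor g ((1 : Int) <<< (8 * x + y).toNat) else g) 0
    -- shift amount '8*x + y' is in [0,63] under the guard, so .toNat is exact

-- ===== PRECONDITION & SPEC =====
-- Pre_ excludes routes containing a point with fewer than 2 coordinates: there Python A
-- (and Python B alike) raises IndexError on p[0]/p[1].
def Pre_get_route_grid (route : List (List Int)) : Prop := ∀ p ∈ route, 2 ≤ p.length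
instance (route : List (List Int)) : Decidable (Pre_get_route_grid route) := by unfold Pre_get_route_grid; infer_instance
def pvWitness_get_route_grid : List (List Int) := [[12, 12], [90, -3]]
def Spec_get_route_grid (route : List (List Int)) (out : Int) : Prop := out = get_route_grid_alt route
instance (route : List (List Int)) (out : Int) : Decidable (Spec_get_route_grid route out) := by unfold Spec_get_route_grid; infer_instance

-- ===== CLAIM (what is proved, stated in full; the proofs are below) =====
def Claim_equal_get_route_grid : Prop := ∀ (route : List (List Int)), Dom_get_route_grid route → Pre_get_route_grid route → Spec_get_route_grid route (get_route_grid route)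

-- ===== LEMMAS AND PROOFS =====

theorem pvShiftCast (k : Nat) : (1 : Int) <<< k = ((1 <<< k : Nat) : Int) := by
  simp [Int.natCast_shiftLeft]

-- an Int or-fold of single bits is the cast of the corresponding Nat or-fold
theorem pvCastFold {α : Type} (l : List α) (c : α → Prop) [DecidablePred c] (k : α → Nat) (n : Nat) :
    l.foldl (fun acc e => if c e then PySem.Int.bor acc ((1 : Int) <<< k e) else acc) (n : Int)
      = ((l.foldl (fun acc e => if c e then acc ||| (1 <<< k e) else acc) n : Nat) : Int) := by
  induction l generalizing n with
  | nil => simp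
  | cons e t ih =>
    simp only [List.foldl_cons]
    by_cases h : c e
    · rw [if_pos h, if_pos h, pvShiftCast, PySem.Int.bor_natCast, ih]
    · rw [if_neg h, if_neg h, ih]

-- bit j of a Nat or-fold of single bits
theorem pvTestBitFold {α : Type} (l : List α) (c : α → Prop) [DecidablePred c] (k : α → Nat) (n j : Nat) :
    (l.foldl (fun acc e => if c e then acc ||| (1 <<< k e) else acc) n).testBit j
      = (n.testBit j || l.any (fun e => decide (c e ∧ k e = j))) := by
  induction l generalizing n with
  | nil => simp
  | cons e t ih =>
    simp only [List.foldl_cons, List.any_cons]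
    by_cases h : c e
    · rw [if_pos h, ih, Nat.testBit_or, Nat.one_shiftLeft, Nat.testBit_two_pow]
      by_cases hj : k e = j <;> simp [h, hj]
    · rw [if_neg h, ih]; simp [h]

theorem pvCastFold2 {α β : Type} (lo : List α) (li : List β) (c : α → β → Prop)
    [∀ x, DecidablePred (c x)] (k : α → β → Nat) (n : Nat) :
    lo.foldl (fun acc x => li.foldl (fun acc y => if c x y then PySem.Int.bor acc ((1 : Int) <<< k x y) else acc) acc) (n : Int)
      = ((lo.foldl (fun acc x => li.foldl (fun acc y => if c x y then acc ||| (1 <<< k x y) else acc) acc) n : Nat) : Int) := by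
  induction lo generalizing n with
  | nil => simp
  | cons x t ih =>
    simp only [List.foldl_cons]
    rw [pvCastFold li (c x) (k x) n, ih]

theorem pvTestBitFold2 {α β : Type} (lo : List α) (li : List β) (c : α → β → Prop)
    [∀ x, DecidablePred (c x)] (k : α → β → Nat) (n j : Nat) :
    (lo.foldl (fun acc x => li.foldl (fun acc y => if c x y then acc ||| (1 <<< k x y) else acc) acc) n).testBit j
      = (n.testBit j || lo.any (fun x => li.any (fun y => decide (c x y ∧ k x y = j)))) := by
  induction lo generalizing n with
  | nil => simp
  | cons x t ih =>
    simp only [List.foldl_cons, List.any_cons]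
    rw [ih, pvTestBitFold li (c x) (k x) n j, Bool.or_assoc]

-- the break-loop sets the bit iff some route point is close to the cell centre
theorem pvLoopRoute_eq (pos : Int × Int) (route : List (List Int)) (cg bit : Int) :
    pvLoopRoute pos route cg bit =
      if route.any (fun p => decide (chessboard_dist pos p ≤ 4)) then PySem.Int.bor cg bit else cg := by
  induction route with
  | nil => simp [pvLoopRoute]
  | cons p r ih =>
    by_cases h : chessboard_dist pos p ≤ 4 <;> simp [pvLoopRoute, h, ih]

-- Nat shadows of the two accumulators
def natA (route : List (List Int)) : Nat :=
  (PySem.List.pyRange 0 pvDimension 1).foldl (fun acc x =>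
    (PySem.List.pyRange 0 pvDimension 1).foldl (fun acc y =>
      if (route.any fun p => decide (chessboard_dist (pvOffset + pvScale * x, pvOffset + pvScale * y) p ≤ 4)) = true
      then acc ||| (1 <<< (pvDimension * x + y).toNat) else acc) acc) 0

def natB (route : List (List Int)) : Nat :=
  route.foldl (fun g p =>
    if 0 ≤ PySem.Int.floordiv (PySem.List.pyGetD p 0 0 - 8) 11 ∧
       PySem.Int.floordiv (PySem.List.pyGetD p 0 0 - 8) 11 < 8 ∧
       0 ≤ PySem.Int.floordiv (PySem.List.pyGetD p 1 0 - 8) 11 ∧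
       PySem.Int.floordiv (PySem.List.pyGetD p 1 0 - 8) 11 < 8 ∧
       (PySem.List.pyGetD p 0 0 - 8) - 11 * PySem.Int.floordiv (PySem.List.pyGetD p 0 0 - 8) 11 ≤ 8 ∧
       (PySem.List.pyGetD p 1 0 - 8) - 11 * PySem.Int.floordiv (PySem.List.pyGetD p 1 0 - 8) 11 ≤ 8
    then g ||| (1 <<< (8 * PySem.Int.floordiv (PySem.List.pyGetD p 0 0 - 8) 11 +
                       PySem.Int.floordiv (PySem.List.pyGetD p 1 0 - 8) 11).toNat) else g) 0

theorem pvA_cast (route : List (List Int)) : get_route_grid route = (natA route : Int) := by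
  unfold get_route_grid natA
  simp only [pvLoopRoute_eq]
  exact pvCastFold2 (PySem.List.pyRange 0 pvDimension 1) (PySem.List.pyRange 0 pvDimension 1)
    (fun x y => (route.any fun p => decide (chessboard_dist (pvOffset + pvScale * x, pvOffset + pvScale * y) p ≤ 4)) = true)
    (fun x y => (pvDimension * x + y).toNat) 0

theorem pvB_cast (route : List (List Int)) : get_route_grid_alt route = (natB route : Int) := by
  unfold get_route_grid_alt natB
  exact pvCastFold route
    (fun p => 0 ≤ PySem.Int.floordiv (PySem.List.pyGetD p 0 0 - 8) 11 ∧
       PySem.Int.floordiv (PySem.List.pyGetD p 0 0 - 8) 11 < 8 ∧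
       0 ≤ PySem.Int.floordiv (PySem.List.pyGetD p 1 0 - 8) 11 ∧
       PySem.Int.floordiv (PySem.List.pyGetD p 1 0 - 8) 11 < 8 ∧
       (PySem.List.pyGetD p 0 0 - 8) - 11 * PySem.Int.floordiv (PySem.List.pyGetD p 0 0 - 8) 11 ≤ 8 ∧
       (PySem.List.pyGetD p 1 0 - 8) - 11 * PySem.Int.floordiv (PySem.List.pyGetD p 1 0 - 8) 11 ≤ 8)
    (fun p => (8 * PySem.Int.floordiv (PySem.List.pyGetD p 0 0 - 8) 11 +
               PySem.Int.floordiv (PySem.List.pyGetD p 1 0 - 8) 11).toNat) 0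

-- the heart: bit (8x+y) is set by A iff some route point floor-divides to cell (x,y)
theorem pvNatAB (route : List (List Int)) : natA route = natB route := by
  apply Nat.eq_of_testBit_eq
  intro j
  unfold natA natB
  rw [pvTestBitFold2 (PySem.List.pyRange 0 pvDimension 1) (PySem.List.pyRange 0 pvDimension 1)
    (fun x y => (route.any fun p => decide (chessboard_dist (pvOffset + pvScale * x, pvOffset + pvScale * y) p ≤ 4)) = true)
    (fun x y => (pvDimension * x + y).toNat) 0 j]
  rw [pvTestBitFold route
    (fun p => 0 ≤ PySem.Int.floordiv (PySem.List.pyGetD p 0 0 - 8) 11 ∧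
       PySem.Int.floordiv (PySem.List.pyGetD p 0 0 - 8) 11 < 8 ∧
       0 ≤ PySem.Int.floordiv (PySem.List.pyGetD p 1 0 - 8) 11 ∧
       PySem.Int.floordiv (PySem.List.pyGetD p 1 0 - 8) 11 < 8 ∧
       (PySem.List.pyGetD p 0 0 - 8) - 11 * PySem.Int.floordiv (PySem.List.pyGetD p 0 0 - 8) 11 ≤ 8 ∧
       (PySem.List.pyGetD p 1 0 - 8) - 11 * PySem.Int.floordiv (PySem.List.pyGetD p 1 0 - 8) 11 ≤ 8)
    (fun p => (8 * PySem.Int.floordiv (PySem.List.pyGetD p 0 0 - 8) 11 +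
               PySem.Int.floordiv (PySem.List.pyGetD p 1 0 - 8) 11).toNat) 0 j]
  simp only [Nat.zero_testBit, Bool.false_or]
  rw [Bool.eq_iff_iff]
  simp only [List.any_eq_true, decide_eq_true_eq, PySem.List.mem_pyRange_one, chessboard_dist,
    max_le_iff, abs_le, pvDimension, pvScale, pvOffset]
  constructor
  · rintro ⟨x, hx, y, hy, ⟨p, hp, hc⟩, hj⟩
    refine ⟨p, hp, ?_⟩
    have h1 := PySem.Int.floordiv_mul_add_mod (PySem.List.pyGetD p 0 0 - 8) 11
    have h2 := PySem.Int.mod_nonneg (PySem.List.pyGetD p 0 0 - 8) (by norm_num : (0:Int) < 11)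
    have h3 := PySem.Int.mod_lt (PySem.List.pyGetD p 0 0 - 8) (by norm_num : (0:Int) < 11)
    have h4 := PySem.Int.floordiv_mul_add_mod (PySem.List.pyGetD p 1 0 - 8) 11
    have h5 := PySem.Int.mod_nonneg (PySem.List.pyGetD p 1 0 - 8) (by norm_num : (0:Int) < 11)
    have h6 := PySem.Int.mod_lt (PySem.List.pyGetD p 1 0 - 8) (by norm_num : (0:Int) < 11)
    omega
  · rintro ⟨p, hp, hc, hj⟩
    have h1 := PySem.Int.floordiv_mul_add_mod (PySem.List.pyGetD p 0 0 - 8) 11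
    have h2 := PySem.Int.mod_nonneg (PySem.List.pyGetD p 0 0 - 8) (by norm_num : (0:Int) < 11)
    have h3 := PySem.Int.mod_lt (PySem.List.pyGetD p 0 0 - 8) (by norm_num : (0:Int) < 11)
    have h4 := PySem.Int.floordiv_mul_add_mod (PySem.List.pyGetD p 1 0 - 8) 11
    have h5 := PySem.Int.mod_nonneg (PySem.List.pyGetD p 1 0 - 8) (by norm_num : (0:Int) < 11)
    have h6 := PySem.Int.mod_lt (PySem.List.pyGetD p 1 0 - 8) (by norm_num : (0:Int) < 11)
    exact ⟨PySem.Int.floordiv (PySem.List.pyGetD p 0 0 - 8) 11, by omega,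
           PySem.Int.floordiv (PySem.List.pyGetD p 1 0 - 8) 11, by omega,
           ⟨p, hp, by omega⟩, by omega⟩

-- ===== VERDICT (by name: the statement is the Claim_ definition above) =====
theorem get_route_grid_spec : Claim_equal_get_route_grid := by
  intro route _ _
  unfold Spec_get_route_grid
  rw [pvA_cast, pvB_cast, pvNatAB]
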